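-- pv_equiv track=rewrite | github.com/MJava2002/Freeuni-Cryptography | assignment-1-MJava2002-main/assignment-1-MJava2002-main/challenge3.py | calculate_max_score
-- ===== SOURCE A (Python) =====
-- def calculate_max_score(text):
--     frequency = 'etaoin shrdlu'
--     bytes_freq = bytes(ord(char) for char in frequency)
--     score = 0
--     for ch in text:
--         if ch in bytes_freq:
--             score += 1
--     return score
-- ===== SOURCE B (Python) =====
-- def calculate_max_score(text):
--     hist = {}
--     for ch in text:
--         hist[ch] = hist.get(ch, 0) + 1
--     return sum(hist.get(v, 0) for v in b'etaoin shrdlu')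
-- ===== Notes on version B (the rewrite author's own statement) =====
-- stated objective: alternative
-- what changed: B builds a histogram of text in one pass and then sums the 13 frequency byte values' counts out of it, instead of A's membership-test scan with an accumulator.
import Mathlib
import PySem

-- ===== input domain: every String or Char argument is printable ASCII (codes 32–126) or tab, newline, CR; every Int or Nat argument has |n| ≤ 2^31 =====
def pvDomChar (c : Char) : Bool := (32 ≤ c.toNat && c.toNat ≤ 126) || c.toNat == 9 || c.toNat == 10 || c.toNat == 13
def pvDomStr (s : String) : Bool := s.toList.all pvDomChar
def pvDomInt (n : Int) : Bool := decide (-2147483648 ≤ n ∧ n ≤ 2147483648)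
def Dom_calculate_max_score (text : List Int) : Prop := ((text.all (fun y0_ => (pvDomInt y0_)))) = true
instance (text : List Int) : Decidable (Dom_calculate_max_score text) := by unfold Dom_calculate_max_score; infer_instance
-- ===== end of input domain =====

-- B builds a histogram (dict) of text in one pass, then sums the 13 frequency byte
-- values' counts out of it, instead of A's membership-test scan (objective: alternative).

-- ===== PORT A =====
-- bytes(ord(char) for char in 'etaoin shrdlu') as its list of byte values
def calculate_max_score (text : List Int) : Int :=
  let bytes_freq : List Int := [101, 116, 97, 111, 105, 110, 32, 115, 104, 114, 100, 108, 117]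
  text.foldl (fun score ch => if ch ∈ bytes_freq then score + 1 else score) 0

-- ===== PORT B =====
def calculate_max_score_alt (text : List Int) : Int :=
  let hist : PySem.Dict Int Int :=
    text.foldl (fun h ch => h.insert ch (h.getD ch 0 + 1)) PySem.Dict.empty
  ([101, 116, 97, 111, 105, 110, 32, 115, 104, 114, 100, 108, 117] : List Int).foldl
    (fun acc v => acc + hist.getD v 0) 0

-- ===== PRECONDITION & SPEC =====
-- Pre_ excludes exactly the inputs where 'ch in bytes_freq' raises ValueError in A
-- (an element outside the byte range 0..255); A returns on every other list.
def Pre_calculate_max_score (text : List Int) : Prop := ∀ ch ∈ text, 0 ≤ ch ∧ ch ≤ 255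
instance (text : List Int) : Decidable (Pre_calculate_max_score text) := by
  unfold Pre_calculate_max_score; infer_instance
def pvWitness_calculate_max_score : List Int := [101, 120, 32, 116]

def Spec_calculate_max_score (text : List Int) (out : Int) : Prop := out = calculate_max_score_alt text
instance (text : List Int) (out : Int) : Decidable (Spec_calculate_max_score text out) := by unfold Spec_calculate_max_score; infer_instance

-- ===== CLAIM (what is proved, stated in full; the proofs are below) =====
def Claim_equal_calculate_max_score : Prop := ∀ (text : List Int), Dom_calculate_max_score text → Pre_calculate_max_score text → Spec_calculate_max_score text (calculate_max_score text)

-- ===== LEMMAS AND PROOFS =====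

-- Summing each target value's count in t, over a duplicate-free target list l,
-- equals one counting pass over t.
theorem sum_count_eq_countP (l : List Int) (hl : l.Nodup) (t : List Int) :
    (l.map (fun b => ((t.count b : Nat) : Int))).sum
      = ((t.countP (fun ch => decide (ch ∈ l)) : Nat) : Int) := by
  induction t with
  | nil => simp
  | cons a t ih =>
    have hcount : ∀ b : Int, (((a :: t).count b : Nat) : Int)
        = ((t.count b : Nat) : Int) + (if b == a then (1 : Int) else 0) := by
      intro b
      by_cases hba : b = a
      · simp [hba]
      · simp [hba, Ne.symm hba]
    have h1 : (l.map (fun b => (((a :: t).count b : Nat) : Int))).sum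
        = (l.map (fun b => ((t.count b : Nat) : Int))).sum
          + (l.map (fun b => if b == a then (1 : Int) else 0)).sum := by
      calc (l.map (fun b => (((a :: t).count b : Nat) : Int))).sum
          = (l.map (fun b => ((t.count b : Nat) : Int) + (if b == a then (1 : Int) else 0))).sum := by
            simp only [hcount]
        _ = _ := by
            rw [PySem.List.sum_map_add_int]
    have h2 : (l.map (fun b => if b == a then (1 : Int) else 0)).sum
        = if a ∈ l then (1 : Int) else 0 := by
      have : (l.map (fun b => if b == a then (1 : Int) else 0)).sum
          = ((l.countP (fun b => b == a) : Nat) : Int) := by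
        rw [PySem.List.sum_map_ite_one_zero]
      rw [this]
      have hc : l.countP (fun b => b == a) = l.count a := rfl
      rw [hc]
      by_cases hmem : a ∈ l
      · rw [List.count_eq_one_of_mem hl hmem]; simp [hmem]
      · rw [List.count_eq_zero_of_not_mem hmem]; simp [hmem]
    rw [h1, ih, h2, List.countP_cons]
    by_cases hmem : a ∈ l <;> simp [hmem]

theorem calculate_max_score_eq (text : List Int) :
    calculate_max_score text = calculate_max_score_alt text := by
  unfold calculate_max_score calculate_max_score_alt
  rw [PySem.List.foldl_ite_add_one, PySem.List.foldl_add]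
  simp only [PySem.Dict.getD_foldl_insert_add_one, PySem.Dict.getD_empty, zero_add]
  rw [sum_count_eq_countP _ (by decide)]

-- ===== VERDICT (by name: the statement is the Claim_ definition above) =====
theorem calculate_max_score_spec : Claim_equal_calculate_max_score := by
  intro text _ _
  exact calculate_max_score_eq text
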